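-- pv_equiv track=rewrite | github.com/ch33nchan/slider_training | SliderTraining-Klein/generate_report.py | select_pre_flux_klein_experiments
-- ===== SOURCE A (Python) =====
-- def select_pre_flux_klein_experiments(experiments: list[dict[str, object]]) -> list[dict[str, object]]:
--     preferred_order = [
--         "eye_gaze_adult",
--         "eye_gaze_neutral",
--         "eye_gaze_v2",
--         "eye_gaze_v3",
--         "eye_gaze_v3b",
--         "eye_gaze_v4",
--         "eye_gaze_v5",
--         "eye_gaze_v6",
--         "eye_gaze_v7",
--         "eye_gaze_v7b",
--         "eye_gaze_v7c",
--         "eye_gaze_v8",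
--         "eye_gaze_text_v1",
--         "eye_gaze_text_v2",
--         "eye_gaze_text_v3",
--         "eye_gaze_horizontal_v1",
--         "eye_gaze_horizontal_texture_v1",
--         "eye_gaze_vertical_v1",
--         "eye_gaze_vertical_texture_v1",
--         "eye_gaze_klein_v1",
--         "eye_gaze_klein_v2",
--     ]
--     order_index = {name: index for index, name in enumerate(preferred_order)}
--     filtered = [
--         item for item in experiments
--         if str(item.get("name")) in order_index
--     ]
--     return sorted(filtered, key=lambda item: order_index[str(item["name"])])
-- ===== SOURCE B (Python) =====
-- def select_pre_flux_klein_experiments(experiments: list[dict[str, object]]) -> list[dict[str, object]]: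
--     preferred_order = [
--         "eye_gaze_adult",
--         "eye_gaze_neutral",
--         "eye_gaze_v2",
--         "eye_gaze_v3",
--         "eye_gaze_v3b",
--         "eye_gaze_v4",
--         "eye_gaze_v5",
--         "eye_gaze_v6",
--         "eye_gaze_v7",
--         "eye_gaze_v7b",
--         "eye_gaze_v7c",
--         "eye_gaze_v8",
--         "eye_gaze_text_v1",
--         "eye_gaze_text_v2",
--         "eye_gaze_text_v3",
--         "eye_gaze_horizontal_v1",
--         "eye_gaze_horizontal_texture_v1",
--         "eye_gaze_vertical_v1",
--         "eye_gaze_vertical_texture_v1",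
--         "eye_gaze_klein_v1",
--         "eye_gaze_klein_v2",
--     ]
--     # stable bucket sort: one pass dropping unknown names into per-name buckets,
--     # then concatenate the buckets in the fixed preferred order -- no comparison sort.
--     buckets = {name: [] for name in preferred_order}
--     for item in experiments:
--         name = str(item.get("name"))
--         if name in buckets:
--             buckets[name].append(item)
--     result = []
--     for name in preferred_order:
--         result.extend(buckets[name])
--     return result
-- ===== Notes on version B (the rewrite author's own statement) =====
-- stated objective: alternative
-- what changed: Replaces A's filter plus comparison sort keyed through an index dict by a stable one-pass bucket sort: items are dropped into per-name buckets during a single sweep and the 21 buckets are concatenated in the fixed preferred order.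
import Mathlib
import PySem

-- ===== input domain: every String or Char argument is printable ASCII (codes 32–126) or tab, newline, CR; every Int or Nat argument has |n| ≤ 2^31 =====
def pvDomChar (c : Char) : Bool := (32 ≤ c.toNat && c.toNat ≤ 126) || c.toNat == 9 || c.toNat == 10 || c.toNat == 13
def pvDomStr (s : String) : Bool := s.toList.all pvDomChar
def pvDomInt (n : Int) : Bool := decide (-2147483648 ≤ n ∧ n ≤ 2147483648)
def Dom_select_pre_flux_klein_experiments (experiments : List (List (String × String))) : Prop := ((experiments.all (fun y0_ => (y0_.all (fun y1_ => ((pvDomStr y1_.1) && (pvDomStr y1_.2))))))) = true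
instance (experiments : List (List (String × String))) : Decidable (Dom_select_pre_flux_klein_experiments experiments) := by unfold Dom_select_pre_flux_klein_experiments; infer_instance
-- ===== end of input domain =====

-- B replaces A's filter + index-dict-keyed comparison sort by a one-pass stable bucket sort into
-- per-name buckets concatenated in the fixed preferred order (objective: alternative).

-- the fixed preferred order (the same literal list appears in both Pythons)
def pvPreferredOrder : List String :=
  [ "eye_gaze_adult", "eye_gaze_neutral", "eye_gaze_v2", "eye_gaze_v3", "eye_gaze_v3b",
    "eye_gaze_v4", "eye_gaze_v5", "eye_gaze_v6", "eye_gaze_v7", "eye_gaze_v7b",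
    "eye_gaze_v7c", "eye_gaze_v8", "eye_gaze_text_v1", "eye_gaze_text_v2", "eye_gaze_text_v3",
    "eye_gaze_horizontal_v1", "eye_gaze_horizontal_texture_v1", "eye_gaze_vertical_v1",
    "eye_gaze_vertical_texture_v1", "eye_gaze_klein_v1", "eye_gaze_klein_v2" ]

-- str(item.get("name")): first-match lookup; a missing key gives str(None) = "None"
-- (values are strings here, so str(v) = v; exact on this input type)
def pvNameOf (item : List (String × String)) : String :=
  match item.find? (fun p => p.1 == "name") with
  | some p => p.2
  | none => "None"

-- ===== PORT A =====
-- order_index = {name: index for index, name in enumerate(preferred_order)}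
def pvOrderIndex : PySem.Dict String Int :=
  (PySem.List.enumerate pvPreferredOrder 0).foldl (fun d p => d.insert p.2 p.1) PySem.Dict.empty

def select_pre_flux_klein_experiments (experiments : List (List (String × String))) : List (List (String × String)) :=
  let filtered := experiments.filter (fun item => pvOrderIndex.contains (pvNameOf item))
  -- key: order_index[str(item["name"])]; every filtered item's name is a key of the dict,
  -- so the KeyError branch (get? = none) is unreachable and .getD 0 never supplies its default
  PySem.List.sorted filtered (fun item => (pvOrderIndex.get? (pvNameOf item)).getD 0) false

-- ===== PORT B =====
def select_pre_flux_klein_experiments_alt (experiments : List (List (String × String))) : List (List (String × String)) :=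
  -- buckets = {name: [] for name in preferred_order}
  let buckets0 := pvPreferredOrder.foldl
    (fun d name => d.insert name ([] : List (List (String × String)))) PySem.Dict.empty
  -- for item in experiments: if name in buckets: buckets[name].append(item)
  let buckets := experiments.foldl
    (fun d item =>
      let name := pvNameOf item
      if d.contains name then d.modify name [] (fun b => b ++ [item]) else d) buckets0
  -- result = []; for name in preferred_order: result.extend(buckets[name])
  pvPreferredOrder.foldl (fun acc name => acc ++ buckets.getD name []) []

-- ===== PRECONDITION & SPEC =====
def Spec_select_pre_flux_klein_experiments (experiments : List (List (String × String))) (out : List (List (String × String))) : Prop := out = select_pre_flux_klein_experiments_alt experiments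
instance (experiments : List (List (String × String))) (out : List (List (String × String))) : Decidable (Spec_select_pre_flux_klein_experiments experiments out) := by unfold Spec_select_pre_flux_klein_experiments; infer_instance

-- ===== CLAIM (what is proved, stated in full; the proofs are below) =====
def Claim_equal_select_pre_flux_klein_experiments : Prop := ∀ (experiments : List (List (String × String))), Dom_select_pre_flux_klein_experiments experiments → Spec_select_pre_flux_klein_experiments experiments (select_pre_flux_klein_experiments experiments)

-- ===== LEMMAS AND PROOFS =====

-- buckets-by-filter: the common shape both sides reduce to
def pvBuckets {α : Type} (nameOf : α → String) (ks : List String) (xs : List α) : List α :=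
  ks.flatMap (fun k => xs.filter (fun a => nameOf a == k))

-- ---------- A-side ----------

def pvItemsLit : List (String × Int) :=
    [("eye_gaze_adult",(0:Int)), ("eye_gaze_neutral",1), ("eye_gaze_v2",2), ("eye_gaze_v3",3),
     ("eye_gaze_v3b",4), ("eye_gaze_v4",5), ("eye_gaze_v5",6), ("eye_gaze_v6",7),
     ("eye_gaze_v7",8), ("eye_gaze_v7b",9), ("eye_gaze_v7c",10), ("eye_gaze_v8",11),
     ("eye_gaze_text_v1",12), ("eye_gaze_text_v2",13), ("eye_gaze_text_v3",14),
     ("eye_gaze_horizontal_v1",15), ("eye_gaze_horizontal_texture_v1",16),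
     ("eye_gaze_vertical_v1",17), ("eye_gaze_vertical_texture_v1",18),
     ("eye_gaze_klein_v1",19), ("eye_gaze_klein_v2",20)]

set_option maxHeartbeats 4000000 in
theorem pv_dict : pvOrderIndex = PySem.Dict.mk pvItemsLit := by
  apply PySem.Dict.ext
  decide

set_option maxHeartbeats 2000000 in
theorem pv_contains_iff (s : String) : pvOrderIndex.contains s = true ↔ s ∈ pvPreferredOrder := by
  rw [pv_dict, PySem.Dict.contains_mk]
  simp [pvItemsLit, pvPreferredOrder]
  tauto

set_option maxHeartbeats 2000000 in
theorem pv_key_eq (s : String) (h : s ∈ pvPreferredOrder) :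
    (pvOrderIndex.get? s).getD 0 = (pvPreferredOrder.idxOf s : Int) := by
  rw [pv_dict]
  fin_cases h <;> decide

-- insertion into U ++ V when x goes exactly between
theorem pv_insertBy_mid {α : Type} (key : α → Int) (x : α) (U V : List α)
    (hU : ∀ u ∈ U, ¬ key x < key u) (hV : ∀ v ∈ V, key x < key v) :
    PySem.List.insertBy (fun a b => decide (key a < key b)) x (U ++ V) = U ++ x :: V := by
  induction U with
  | nil =>
    cases V with
    | nil => simp [PySem.List.insertBy]
    | cons v vs => simp [PySem.List.insertBy, hV v (by simp)]
  | cons u us ih =>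
    have h := hU u (by simp)
    simp only [List.cons_append, PySem.List.insertBy]
    rw [if_neg (by simpa using h)]
    rw [ih (fun a ha => hU a (by simp [ha])) ]

-- one insertion step on buckets
theorem pv_insert_bucket {α : Type} (nameOf : α → String) (ks : List String) (hnd : ks.Nodup)
    (x : α) (p : List α) (hx : nameOf x ∈ ks) :
    PySem.List.insertBy
      (fun a b => decide (((ks.idxOf (nameOf a) : Int)) < ((ks.idxOf (nameOf b) : Int))))
      x (pvBuckets nameOf ks p)
    = pvBuckets nameOf ks (p ++ [x]) := by
  obtain ⟨U, V, rfl⟩ := List.append_of_mem hx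
  rw [List.nodup_append] at hnd
  obtain ⟨hU, hV, hdisj⟩ := hnd
  have hnmU : nameOf x ∉ U := fun hmem => hdisj _ hmem _ (by simp) rfl
  have hnmV : nameOf x ∉ V := by
    intro hmem; exact (List.nodup_cons.1 hV).1 hmem
  -- index facts
  have hidx_nm : (U ++ nameOf x :: V).idxOf (nameOf x) = U.length := by
    rw [List.idxOf_append, if_neg hnmU, List.idxOf_cons_self]
    omega
  have hidx_U : ∀ k ∈ U, (U ++ nameOf x :: V).idxOf k < U.length := by
    intro k hk
    rw [List.idxOf_append, if_pos hk]
    exact List.idxOf_lt_length_of_mem hk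
  have hidx_V : ∀ k ∈ V, U.length < (U ++ nameOf x :: V).idxOf k := by
    intro k hk
    have hkU : k ∉ U := fun hmem => hdisj _ hmem _ (by simp [hk]) rfl
    have hknm : k ≠ nameOf x := fun heq => hnmV (heq ▸ hk)
    rw [List.idxOf_append, if_neg hkU, List.idxOf_cons_ne _ (Ne.symm hknm)]
    omega
  -- decompose the buckets of p
  have hsplit : pvBuckets nameOf (U ++ nameOf x :: V) p
      = (U.flatMap (fun k => p.filter (fun a => nameOf a == k))
          ++ p.filter (fun a => nameOf a == nameOf x))
        ++ V.flatMap (fun k => p.filter (fun a => nameOf a == k)) := by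
    simp [pvBuckets, List.flatMap_append]
  rw [hsplit, pv_insertBy_mid]
  · -- the resulting list is the buckets of p ++ [x]
    simp only [pvBuckets, List.flatMap_append, List.flatMap_cons, List.filter_append]
    have hfx_nm : List.filter (fun a => nameOf a == nameOf x) [x] = [x] := by simp
    have hfx_U : ∀ k ∈ U, List.filter (fun a => nameOf a == k) [x] = [] := by
      intro k hk
      have : nameOf x ≠ k := fun heq => hnmU (heq ▸ hk)
      simp [this]
    have hfx_V : ∀ k ∈ V, List.filter (fun a => nameOf a == k) [x] = [] := by
      intro k hk
      have : nameOf x ≠ k := fun heq => hnmV (heq ▸ hk)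
      simp [this]
    have hUU : U.flatMap (fun k => p.filter (fun a => nameOf a == k)
                  ++ List.filter (fun a => nameOf a == k) [x])
        = U.flatMap (fun k => p.filter (fun a => nameOf a == k)) :=
      List.flatMap_congr (fun k hk => by rw [hfx_U k hk, List.append_nil])
    have hVV : V.flatMap (fun k => p.filter (fun a => nameOf a == k)
                  ++ List.filter (fun a => nameOf a == k) [x])
        = V.flatMap (fun k => p.filter (fun a => nameOf a == k)) :=
      List.flatMap_congr (fun k hk => by rw [hfx_V k hk, List.append_nil])
    rw [hUU, hVV, hfx_nm]
    simp
  · -- everything in the U-part has key ≤ key x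
    intro u hu
    rcases List.mem_append.1 hu with hu1 | hu2
    · obtain ⟨k, hk, hmem⟩ := List.mem_flatMap.1 hu1
      have : nameOf u = k := by simpa using (List.mem_filter.1 hmem).2
      have := hidx_U k hk
      rw [‹nameOf u = k›, hidx_nm]
      omega
    · have : nameOf u = nameOf x := by simpa using (List.mem_filter.1 hu2).2
      simp [this]
  · -- everything in the V-part has key > key x
    intro v hv
    obtain ⟨k, hk, hmem⟩ := List.mem_flatMap.1 hv
    have : nameOf v = k := by simpa using (List.mem_filter.1 hmem).2
    have := hidx_V k hk
    rw [‹nameOf v = k›, hidx_nm]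
    omega

-- folding insertions from buckets of a prefix
theorem pv_fold_buckets {α : Type} (nameOf : α → String) (ks : List String) (hnd : ks.Nodup)
    (xs : List α) : ∀ (p : List α), (∀ x ∈ xs, nameOf x ∈ ks) →
    xs.foldl (fun acc x => PySem.List.insertBy
      (fun a b => decide (((ks.idxOf (nameOf a) : Int)) < ((ks.idxOf (nameOf b) : Int)))) x acc)
      (pvBuckets nameOf ks p)
    = pvBuckets nameOf ks (p ++ xs) := by
  induction xs with
  | nil => intro p _; simp
  | cons x xs ih =>
    intro p h
    simp only [List.foldl_cons]
    rw [pv_insert_bucket nameOf ks hnd x p (h x (by simp))]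
    rw [ih (p ++ [x]) (fun y hy => h y (by simp [hy]))]
    simp

-- the key function only matters on the list being sorted
theorem pv_insertBy_congr {α : Type} (k1 k2 : α → Int) (x : α) (acc : List α)
    (hx : k1 x = k2 x) (hacc : ∀ a ∈ acc, k1 a = k2 a) :
    PySem.List.insertBy (fun a b => decide (k1 a < k1 b)) x acc
    = PySem.List.insertBy (fun a b => decide (k2 a < k2 b)) x acc := by
  induction acc with
  | nil => rfl
  | cons a as ih =>
    simp only [PySem.List.insertBy]
    simp only [hx, hacc a (by simp), ih (fun b hb => hacc b (by simp [hb]))]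

theorem pv_sorted_congr {α : Type} (k1 k2 : α → Int) (xs : List α)
    (h : ∀ x ∈ xs, k1 x = k2 x) :
    PySem.List.sorted xs k1 false = PySem.List.sorted xs k2 false := by
  rw [PySem.List.sorted_eq_foldl_insertBy, PySem.List.sorted_eq_foldl_insertBy]
  have main : ∀ (ys acc : List α), (∀ x ∈ ys, k1 x = k2 x) → (∀ a ∈ acc, k1 a = k2 a) →
      ys.foldl (fun acc x => PySem.List.insertBy (fun a b => decide (k1 a < k1 b)) x acc) acc
      = ys.foldl (fun acc x => PySem.List.insertBy (fun a b => decide (k2 a < k2 b)) x acc) acc := by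
    intro ys
    induction ys with
    | nil => intro acc _ _; rfl
    | cons y ys ih =>
      intro acc hys hacc
      simp only [List.foldl_cons]
      rw [pv_insertBy_congr k1 k2 y acc (hys y (by simp)) hacc]
      exact ih _ (fun x hx => hys x (by simp [hx]))
        (fun a ha => by
          rcases (PySem.List.mem_insertBy _ y a acc).1 ha with rfl | ha'
          · exact hys a (by simp)
          · exact hacc a ha')
  exact main xs [] h (by simp)

-- A reduces to buckets-by-filter over the whole input
theorem pv_A_eq (experiments : List (List (String × String))) :
    select_pre_flux_klein_experiments experiments
    = pvBuckets pvNameOf pvPreferredOrder experiments := by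
  unfold select_pre_flux_klein_experiments
  simp only []
  have hnd : pvPreferredOrder.Nodup := by decide
  set filtered := experiments.filter (fun item => pvOrderIndex.contains (pvNameOf item)) with hfil
  have hmem : ∀ x ∈ filtered, pvNameOf x ∈ pvPreferredOrder := by
    intro x hx
    have := (List.mem_filter.1 hx).2
    exact (pv_contains_iff _).1 this
  rw [pv_sorted_congr _ (fun item => ((pvPreferredOrder.idxOf (pvNameOf item) : Int)))
        filtered (fun x hx => pv_key_eq _ (hmem x hx))]
  rw [PySem.List.sorted_eq_foldl_insertBy]
  have h0 : pvBuckets pvNameOf pvPreferredOrder ([] : List (List (String × String))) = [] := by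
    simp [pvBuckets]
  rw [← h0, pv_fold_buckets pvNameOf pvPreferredOrder hnd filtered [] hmem]
  -- buckets of filtered = buckets of experiments
  simp only [List.nil_append]
  unfold pvBuckets
  refine List.flatMap_congr ?_
  intro k hk
  rw [hfil, List.filter_filter]
  refine List.filter_congr ?_
  intro a _
  by_cases hname : pvNameOf a = k
  · simp [hname, (pv_contains_iff k).2 hk]
  · simp [hname]

-- ---------- B-side ----------

-- the initial bucket dict: lookup is `some []` exactly on the listed names
theorem pv_init_get? {ν : Type} (ks : List String) (d : PySem.Dict String ν) (e : ν) (k : String) :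
    (ks.foldl (fun d n => d.insert n e) d).get? k
    = if k ∈ ks then some e else d.get? k := by
  induction ks generalizing d with
  | nil => simp
  | cons a ks ih =>
    simp only [List.foldl_cons, ih]
    by_cases hk : k ∈ ks
    · simp [hk]
    · by_cases hka : k = a
      · subst hka; simp [hk, PySem.Dict.get?_insert_self]
      · simp [hk, hka, PySem.Dict.get?_insert_of_ne d e hka]

-- the bucket-filling loop preserves "contains = membership in the preferred order" and each
-- preferred bucket collects exactly the stable filter of the processed input
theorem pv_fill (xs : List (List (String × String)))
    : ∀ (d : PySem.Dict String (List (List (String × String)))),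
    (∀ s, d.contains s = decide (s ∈ pvPreferredOrder)) →
    ∀ k, k ∈ pvPreferredOrder →
    (xs.foldl (fun d item =>
        let name := pvNameOf item
        if d.contains name then d.modify name [] (fun b => b ++ [item]) else d) d).getD k []
    = d.getD k [] ++ xs.filter (fun a => pvNameOf a == k) := by
  induction xs with
  | nil => intro d _ k _; simp
  | cons x xs ih =>
    intro d H k hk
    simp only [List.foldl_cons]
    by_cases hc : d.contains (pvNameOf x) = true
    · have hname : pvNameOf x ∈ pvPreferredOrder := by
        have := H (pvNameOf x); rw [hc] at this; exact of_decide_eq_true this.symm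
      rw [if_pos hc]
      have H' : ∀ s, (d.modify (pvNameOf x) [] (fun b => b ++ [x])).contains s
          = decide (s ∈ pvPreferredOrder) := by
        intro s
        rw [PySem.Dict.contains_modify, H s]
        by_cases hs : s = pvNameOf x
        · subst hs; simp [hname]
        · simp [hs]
      rw [ih _ H' k hk, PySem.Dict.getD_modify]
      by_cases hkx : k = pvNameOf x
      · subst hkx; simp [List.append_assoc]
      · have : (pvNameOf x == k) = false := by
          simp; exact fun h => hkx h.symm
        simp [hkx, this]
    · rw [if_neg hc]
      have hname : pvNameOf x ∉ pvPreferredOrder := by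
        intro hmem
        rw [H (pvNameOf x), decide_eq_true hmem] at hc
        exact hc rfl
      have : (pvNameOf x == k) = false := by
        simp; intro h; exact hname (h ▸ hk)
      rw [ih _ H k hk, List.filter_cons, this]
      simp

-- B reduces to buckets-by-filter over the whole input
theorem pv_B_eq (experiments : List (List (String × String))) :
    select_pre_flux_klein_experiments_alt experiments
    = pvBuckets pvNameOf pvPreferredOrder experiments := by
  unfold select_pre_flux_klein_experiments_alt
  simp only []
  set buckets0 := pvPreferredOrder.foldl
    (fun d name => d.insert name ([] : List (List (String × String)))) PySem.Dict.empty with hb0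
  have hget0 : ∀ k, buckets0.get? k = if k ∈ pvPreferredOrder then some [] else none := by
    intro k
    rw [hb0, pv_init_get?]
    by_cases hk : k ∈ pvPreferredOrder <;> simp [hk]
  have H0 : ∀ s, buckets0.contains s = decide (s ∈ pvPreferredOrder) := by
    intro s
    rw [PySem.Dict.contains_eq_isSome_get?, hget0 s]
    by_cases hs : s ∈ pvPreferredOrder <;> simp [hs]
  rw [PySem.List.foldl_append_eq_flatMap]
  simp only [List.nil_append]
  unfold pvBuckets
  refine List.flatMap_congr ?_
  intro k hk
  rw [pv_fill experiments buckets0 H0 k hk]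
  rw [PySem.Dict.getD_eq_get?_getD, hget0 k, if_pos hk]
  simp

-- ===== VERDICT (by name: the statement is the Claim_ definition above) =====
theorem select_pre_flux_klein_experiments_spec : Claim_equal_select_pre_flux_klein_experiments := by
  intro experiments _
  unfold Spec_select_pre_flux_klein_experiments
  rw [pv_A_eq, pv_B_eq]
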